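-- pv_equiv track=rewrite | github.com/abigailc/compbio-reticulation-annotation | annotate_parseranger.py | Order_List_By_Commas
-- ===== SOURCE A (Python) =====
-- import operator
--
-- def Order_List_By_Commas(list_input):
--     """
--     this takes in a list of strings, counts how many commas are in each
--     and then reverse-sorts them by # of commas
--
--     args:
--         list_input: a list of strings to be ordered by # commas
--     output:
--         an ordered list of strings, where [0] has the most commas
--     """
--     comma_dict = {}
--     for item in list_input:
--         commanum = 0
--         for character in item:
--             if character == ",":
--                 commanum +=1
--         comma_dict[item] = commanum
--     sorted_x = sorted(comma_dict.items(), key=operator.itemgetter(1), reverse=True)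
--     #sorted_x will be a list of sorted tuples, those with MOST commas in front.
--     #now turn it into a list
--     comma_list = []
--     for item in sorted_x:
--         comma_list.append(item[0])
--     assert comma_list != [], "did not populate comma list"
--     return comma_list
-- ===== SOURCE B (Python) =====
-- def Order_List_By_Commas(list_input):
--     """
--     Bucket (counting-sort) re-implementation: dedup keeping first occurrence,
--     group strings by comma count, then emit buckets from the highest count down.
--     """
--     uniq = list(dict.fromkeys(list_input))
--     assert uniq != [], "did not populate comma list"
--     buckets = {}
--     for item in uniq:
--         buckets.setdefault(item.count(','), []).append(item)
--     result = []
--     for c in range(max(buckets), -1, -1):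
--         result.extend(buckets.get(c, []))
--     return result
-- ===== Notes on version B (the rewrite author's own statement) =====
-- stated objective: faster
-- what changed: Replaces the comparison-based stable reverse sort of dict items with a counting/bucket sort: dedup first, bucket strings by comma count, then concatenate buckets from the maximum count down to 0.
import Mathlib
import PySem

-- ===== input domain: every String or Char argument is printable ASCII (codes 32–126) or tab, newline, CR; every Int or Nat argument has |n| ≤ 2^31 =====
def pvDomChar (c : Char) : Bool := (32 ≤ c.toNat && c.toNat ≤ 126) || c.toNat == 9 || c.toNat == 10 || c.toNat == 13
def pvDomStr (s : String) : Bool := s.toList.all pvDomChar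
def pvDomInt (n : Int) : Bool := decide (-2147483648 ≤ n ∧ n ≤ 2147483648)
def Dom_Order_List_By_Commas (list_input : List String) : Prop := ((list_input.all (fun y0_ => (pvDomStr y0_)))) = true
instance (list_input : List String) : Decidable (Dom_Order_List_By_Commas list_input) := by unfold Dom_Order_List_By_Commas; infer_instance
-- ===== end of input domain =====

-- B replaces A's comparison-based stable reverse sort with a counting/bucket sort over comma counts (alternative algorithm, same exact output).

-- ===== PORT A =====
def Order_List_By_Commas (list_input : List String) : List String :=
  let comma_dict : PySem.Dict String Int :=
    list_input.foldl (fun d item =>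
      d.insert item (item.toList.foldl
        (fun commanum character => if character == ',' then commanum + 1 else commanum) (0 : Int)))
      PySem.Dict.empty
  let sorted_x := PySem.List.sorted comma_dict.items (fun p => p.2) true
  -- the 'assert comma_list != []' raises exactly on empty input; excluded by Pre_
  sorted_x.foldl (fun comma_list item => comma_list ++ [item.1]) []

-- ===== PORT B =====
def Order_List_By_Commas_alt (list_input : List String) : List String :=
  let uniq : List String := PySem.List.dedup list_input
  -- 'assert uniq != []' raises exactly on empty input; excluded by Pre_
  let buckets : PySem.Dict Int (List String) :=
    uniq.foldl (fun d item =>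
      d.modify ((PySem.Str.count item "," : Nat) : Int) [] (fun b => b ++ [item]))
      PySem.Dict.empty
  match PySem.List.max? buckets.keys (fun c => c) with
  | none => []  -- unreachable inside Pre_: empty input already failed the assert
  | some mx =>
    (PySem.List.pyRange mx (-1) (-1)).foldl (fun result c => result ++ buckets.getD c []) []

-- ===== PRECONDITION & SPEC =====
-- Pre_ excludes only the empty list, on which both Pythons raise AssertionError.
def Pre_Order_List_By_Commas (list_input : List String) : Prop := list_input ≠ []
instance (list_input : List String) : Decidable (Pre_Order_List_By_Commas list_input) := by
  unfold Pre_Order_List_By_Commas; infer_instance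
def pvWitness_Order_List_By_Commas : List String := ["a,b", "c"]

def Spec_Order_List_By_Commas (list_input : List String) (out : List String) : Prop :=
  out = Order_List_By_Commas_alt list_input
instance (list_input : List String) (out : List String) : Decidable (Spec_Order_List_By_Commas list_input out) := by
  unfold Spec_Order_List_By_Commas; infer_instance

-- ===== CLAIM (what is proved, stated in full; the proofs are below) =====
def Claim_equal_Order_List_By_Commas : Prop :=
  ∀ (list_input : List String), Dom_Order_List_By_Commas list_input →
    Pre_Order_List_By_Commas list_input →
    Spec_Order_List_By_Commas list_input (Order_List_By_Commas list_input)

-- ===== LEMMAS AND PROOFS =====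

-- Python's s.count(',') for a single-character needle is the character count.
theorem pv_count_go_singleton (c : Char) :
    ∀ (fuel : Nat) (l : List Char) (acc : Nat), l.length ≤ fuel →
      PySem.Chars.count.go [c] fuel l acc = acc + l.count c := by
  intro fuel
  induction fuel with
  | zero =>
    intro l acc h
    cases l with
    | nil => simp [PySem.Chars.count.go]
    | cons x t => simp at h
  | succ n ih =>
    intro l acc h
    cases l with
    | nil => simp [PySem.Chars.count.go]
    | cons x t =>
      have ht : t.length ≤ n := by simp at h; omega
      have hstep : PySem.Chars.count.go [c] (n+1) (x :: t) acc
          = if [c].isPrefixOf (x :: t) then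
              PySem.Chars.count.go [c] n (List.drop [c].length (x :: t)) (acc + 1)
            else PySem.Chars.count.go [c] n t acc := rfl
      by_cases hcx : c = x
      · subst hcx
        have hp : [c].isPrefixOf (c :: t) = true := by simp [List.isPrefixOf]
        rw [hstep, hp, if_pos rfl]
        simp only [List.length_cons, List.length_nil, List.drop_succ_cons, List.drop_zero]
        rw [ih t (acc + 1) ht]
        simp
        omega
      · have hp : [c].isPrefixOf (x :: t) = false := by
          simp [List.isPrefixOf]
          exact fun h' => hcx (by simpa using h')
        have hxc : (x == c) = false := by
          simp only [beq_eq_false_iff_ne, ne_eq]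
          exact fun h' => hcx h'.symm
        rw [hstep, hp]
        simp only [Bool.false_eq_true, if_false]
        rw [ih t acc ht]
        simp [List.count_cons, hxc]

theorem pv_count_comma (s : String) : PySem.Str.count s "," = s.toList.count ',' := by
  have hsub : ("," : String).toList = [','] := by decide
  have hne : ([','] : List Char).isEmpty = false := by decide
  show PySem.Chars.count s.toList ("," : String).toList = s.toList.count ','
  rw [hsub]
  unfold PySem.Chars.count
  rw [hne]
  simp only [Bool.false_eq_true, if_false]
  simpa using pv_count_go_singleton ',' s.toList.length s.toList 0 le_rfl

-- A's inner character loop computes s.count(',').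
theorem pv_cnt_eq (s : String) :
    s.toList.foldl (fun commanum character => if character == ',' then commanum + 1 else commanum) (0 : Int)
      = ((PySem.Str.count s "," : Nat) : Int) := by
  rw [PySem.List.foldl_beq_add_one, pv_count_comma]
  simp

-- A's dict-building loop: items = first-occurrence dedup, each paired with its key value.
theorem pv_dict_items (f : String → Int) :
    ∀ (l u : List String), u.Nodup →
      (l.foldl (fun d item => d.insert item (f item))
        (PySem.Dict.mk (u.map (fun s => (s, f s))))).items
      = (PySem.Set.update u l).map (fun s => (s, f s)) := by
  intro l
  induction l with
  | nil => intro u _; simp [PySem.Set.update]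
  | cons x t ih =>
    intro u hu
    by_cases hx : x ∈ u
    · have hc : (PySem.Dict.mk (u.map (fun s => (s, f s)))).contains x = true := by
        simp [PySem.Dict.contains_mk, List.any_map, Function.comp_def]
        exact hx
      have hins : (PySem.Dict.mk (u.map (fun s => (s, f s)))).insert x (f x)
          = PySem.Dict.mk (u.map (fun s => (s, f s))) := by
        apply PySem.Dict.ext
        rw [PySem.Dict.items_insert_of_contains _ _ hc]
        show (u.map (fun s => (s, f s))).map _ = u.map (fun s => (s, f s))
        rw [List.map_map]
        apply List.map_congr_left
        intro s _
        by_cases hsx : s = x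
        · subst hsx; simp
        · simp [hsx]
      have hadd : PySem.Set.add u x = u := by
        simp [PySem.Set.add, PySem.Set.contains, hx]
      calc (List.foldl (fun d item => d.insert item (f item))
              ((PySem.Dict.mk (u.map (fun s => (s, f s)))).insert x (f x)) t).items
          = (List.foldl (fun d item => d.insert item (f item))
              (PySem.Dict.mk (u.map (fun s => (s, f s)))) t).items := by rw [hins]
        _ = (PySem.Set.update u t).map (fun s => (s, f s)) := ih u hu
        _ = (PySem.Set.update (PySem.Set.add u x) t).map (fun s => (s, f s)) := by rw [hadd]
    · have hc : (PySem.Dict.mk (u.map (fun s => (s, f s)))).contains x = false := by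
        simp [PySem.Dict.contains_mk, List.any_map, Function.comp_def]
        intro a ha h'
        exact hx (h' ▸ ha)
      have hins : (PySem.Dict.mk (u.map (fun s => (s, f s)))).insert x (f x)
          = PySem.Dict.mk ((u ++ [x]).map (fun s => (s, f s))) := by
        apply PySem.Dict.ext
        rw [PySem.Dict.items_insert_of_not_contains _ _ hc]
        simp
      have hadd : PySem.Set.add u x = u ++ [x] := by
        simp [PySem.Set.add, PySem.Set.contains, hx]
      have hnd : (u ++ [x]).Nodup := by
        rw [List.nodup_append]
        refine ⟨hu, List.nodup_singleton x, ?_⟩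
        intro a ha b hb
        rw [List.mem_singleton] at hb
        subst hb
        intro h'
        exact hx (h' ▸ ha)
      calc (List.foldl (fun d item => d.insert item (f item))
              ((PySem.Dict.mk (u.map (fun s => (s, f s)))).insert x (f x)) t).items
          = (List.foldl (fun d item => d.insert item (f item))
              (PySem.Dict.mk ((u ++ [x]).map (fun s => (s, f s)))) t).items := by rw [hins]
        _ = (PySem.Set.update (u ++ [x]) t).map (fun s => (s, f s)) := ih (u ++ [x]) hnd
        _ = (PySem.Set.update (PySem.Set.add u x) t).map (fun s => (s, f s)) := by rw [hadd]

-- stable insertion commutes with mapping when the comparison factors through the map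
theorem pv_insertBy_map {α β : Type} (g : α → β) (bf : α → α → Bool) (bf' : β → β → Bool)
    (h : ∀ a b : α, bf' (g a) (g b) = bf a b) (x : α) :
    ∀ (ys : List α),
      PySem.List.insertBy bf' (g x) (ys.map g) = (PySem.List.insertBy bf x ys).map g := by
  intro ys
  induction ys with
  | nil => simp [PySem.List.insertBy]
  | cons y t ih =>
    simp only [List.map_cons, PySem.List.insertBy, h]
    cases hb : bf x y <;> simp [ih]

theorem pv_foldl_insertBy_map {α β : Type} (g : α → β) (bf : α → α → Bool) (bf' : β → β → Bool)
    (h : ∀ a b : α, bf' (g a) (g b) = bf a b) :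
    ∀ (l acc : List α),
      (l.map g).foldl (fun a x => PySem.List.insertBy bf' x a) (acc.map g)
        = (l.foldl (fun a x => PySem.List.insertBy bf x a) acc).map g := by
  intro l
  induction l with
  | nil => intro acc; simp
  | cons y t ih =>
    intro acc
    simp only [List.map_cons, List.foldl_cons]
    rw [pv_insertBy_map g bf bf' h y acc]
    exact ih _

-- stable reverse sort of a mapped list
theorem pv_sorted_map {α β : Type} (g : α → β) (key : β → Int) (u : List α) :
    PySem.List.sorted (u.map g) key true = (PySem.List.sorted u (fun a => key (g a)) true).map g := by
  rw [PySem.List.sorted_rev_eq_foldl_insertBy, PySem.List.sorted_rev_eq_foldl_insertBy]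
  have := pv_foldl_insertBy_map g (fun a b => decide (key (g b) < key (g a)))
    (fun p q => decide (key q < key p)) (fun a b => rfl) u []
  simpa using this

-- A's value: the stable reverse sort of the deduplicated input by key f
theorem pv_A_eq (f : String → Int)
    (hf : ∀ s : String, s.toList.foldl
      (fun commanum character => if character == ',' then commanum + 1 else commanum) (0 : Int) = f s)
    (l : List String) :
    Order_List_By_Commas l = PySem.List.sorted (PySem.List.dedup l) f true := by
  unfold Order_List_By_Commas
  have hfold : l.foldl (fun d item =>
      d.insert item (item.toList.foldl
        (fun commanum character => if character == ',' then commanum + 1 else commanum) (0 : Int)))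
      PySem.Dict.empty
      = l.foldl (fun d item => d.insert item (f item)) PySem.Dict.empty := by
    apply PySem.List.foldl_congr_mem
    intro acc x _
    rw [hf x]
  simp only [hfold]
  have hitems : (l.foldl (fun d item => d.insert item (f item)) PySem.Dict.empty).items
      = (PySem.List.dedup l).map (fun s => (s, f s)) := by
    have h0 := pv_dict_items f l [] List.nodup_nil
    simpa [PySem.List.dedup, PySem.Set.ofList_eq_foldl, PySem.Set.update, PySem.Set.empty,
      PySem.Dict.empty] using h0
  rw [hitems]
  rw [pv_sorted_map (fun s => (s, f s)) (fun p => p.2) (PySem.List.dedup l)]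
  rw [PySem.List.foldl_append_singleton_eq_map]
  simp [Function.comp_def]

-- the bucket concatenation, counts n, n-1, …, 0
def pvBuck (f : String → Int) : Nat → List String → List String
  | 0, p => p.filter (fun s => f s == (0 : Int))
  | n+1, p => p.filter (fun s => f s == ((n : Int) + 1)) ++ pvBuck f n p

theorem pv_mem_buck (f : String → Int) :
    ∀ (n : Nat) (p : List String) (y : String), y ∈ pvBuck f n p → f y ≤ (n : Int) := by
  intro n
  induction n with
  | zero =>
    intro p y hy
    simp only [pvBuck, List.mem_filter, beq_iff_eq] at hy
    obtain ⟨-, h2⟩ := hy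
    omega
  | succ n ih =>
    intro p y hy
    simp only [pvBuck, List.mem_append] at hy
    rcases hy with hy | hy
    · simp only [List.mem_filter, beq_iff_eq] at hy
      obtain ⟨-, h2⟩ := hy
      push_cast
      omega
    · have := ih p y hy
      push_cast
      omega

theorem pv_buck_append_gt (f : String → Int) (x : String) :
    ∀ (n : Nat) (p : List String), (n : Int) < f x → pvBuck f n (p ++ [x]) = pvBuck f n p := by
  intro n
  induction n with
  | zero =>
    intro p h
    have hb : (f x == (0 : Int)) = false := by
      simp only [beq_eq_false_iff_ne, ne_eq]
      omega
    simp [pvBuck, List.filter_append, hb]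
  | succ n ih =>
    intro p h
    have hb : (f x == ((n : Int) + 1)) = false := by
      simp only [beq_eq_false_iff_ne, ne_eq]
      push_cast at h
      omega
    have h2 : pvBuck f n (p ++ [x]) = pvBuck f n p := by
      apply ih
      push_cast at h ⊢
      omega
    simp [pvBuck, List.filter_append, hb, h2]

theorem pv_insertBy_skip {α : Type} (bf : α → α → Bool) (x : α) :
    ∀ (L rest : List α), (∀ y ∈ L, bf x y = false) →
      PySem.List.insertBy bf x (L ++ rest) = L ++ PySem.List.insertBy bf x rest := by
  intro L
  induction L with
  | nil => intro rest _; simp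
  | cons y t ih =>
    intro rest h
    have hy : bf x y = false := h y (by simp)
    simp only [List.cons_append, PySem.List.insertBy, hy]
    simp [ih rest (fun z hz => h z (by simp [hz]))]

theorem pv_insertBy_front {α : Type} (bf : α → α → Bool) (x : α) :
    ∀ (rest : List α), (∀ y ∈ rest, bf x y = true) →
      PySem.List.insertBy bf x rest = x :: rest := by
  intro rest h
  cases rest with
  | nil => simp [PySem.List.insertBy]
  | cons y t => simp [PySem.List.insertBy, h y (by simp)]

-- inserting one element into the bucket form appends it to its bucket
theorem pv_step (f : String → Int) (x : String) :
    ∀ (n : Nat) (p : List String), 0 ≤ f x → f x ≤ (n : Int) →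
      PySem.List.insertBy (fun a b => decide (f b < f a)) x (pvBuck f n p)
        = pvBuck f n (p ++ [x]) := by
  intro n
  induction n with
  | zero =>
    intro p h0 hn
    have hx0 : f x = 0 := by omega
    have hb : (f x == (0 : Int)) = true := by simp [hx0]
    simp only [pvBuck]
    rw [PySem.List.insertBy_of_forall_not_before]
    · simp [List.filter_append, hb]
    · intro y hy
      simp only [List.mem_filter, beq_iff_eq] at hy
      simp [hy.2, hx0]
  | succ n ih =>
    intro p h0 hn
    by_cases hc : f x = (n : Int) + 1
    · have hb : (f x == ((n : Int) + 1)) = true := by simp [hc]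
      simp only [pvBuck]
      rw [pv_insertBy_skip]
      · rw [pv_insertBy_front]
        · rw [pv_buck_append_gt f x n p (by omega)]
          simp [List.filter_append, hb]
        · intro y hy
          have := pv_mem_buck f n p y hy
          simp only [decide_eq_true_eq]
          omega
      · intro y hy
        simp only [List.mem_filter, beq_iff_eq] at hy
        simp only [decide_eq_false_iff_not, not_lt]
        rw [hy.2, hc]
    · have hle : f x ≤ (n : Int) := by push_cast at hn; omega
      have hb : (f x == ((n : Int) + 1)) = false := by
        simp only [beq_eq_false_iff_ne, ne_eq]
        exact hc
      simp only [pvBuck]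
      rw [pv_insertBy_skip]
      · rw [ih p h0 hle]
        simp [List.filter_append, hb]
      · intro y hy
        simp only [List.mem_filter, beq_iff_eq] at hy
        simp only [decide_eq_false_iff_not, not_lt]
        rw [hy.2]
        omega

theorem pv_buck_nil (f : String → Int) : ∀ n : Nat, pvBuck f n [] = [] := by
  intro n
  induction n with
  | zero => simp [pvBuck]
  | succ n ih => simp [pvBuck, ih]

theorem pv_foldl_step (f : String → Int) (n : Nat) :
    ∀ (l p : List String), (∀ x ∈ l, 0 ≤ f x ∧ f x ≤ (n : Int)) →
      l.foldl (fun acc x => PySem.List.insertBy (fun a b => decide (f b < f a)) x acc) (pvBuck f n p)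
        = pvBuck f n (p ++ l) := by
  intro l
  induction l with
  | nil => intro p _; simp
  | cons x t ih =>
    intro p h
    simp only [List.foldl_cons]
    rw [pv_step f x n p (h x (by simp)).1 (h x (by simp)).2]
    rw [ih (p ++ [x]) (fun z hz => h z (by simp [hz]))]
    simp

-- the stable reverse sort IS the bucket concatenation
theorem pv_core (f : String → Int) (n : Nat) (u : List String)
    (h : ∀ x ∈ u, 0 ≤ f x ∧ f x ≤ (n : Int)) :
    PySem.List.sorted u f true = pvBuck f n u := by
  rw [PySem.List.sorted_rev_eq_foldl_insertBy]
  have h2 := pv_foldl_step f n u [] h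
  rw [pv_buck_nil] at h2
  simpa using h2

-- the descending range, as B iterates it
theorem pv_range_desc (n : Nat) :
    PySem.List.pyRange (n : Int) (-1) (-1)
      = (List.range (n+1)).map (fun k : Nat => ((n : Int) - (k : Int))) := by
  rw [PySem.List.pyRange_neg_one]
  have h : ((n : Int) - (-1)).toNat = n + 1 := by omega
  rw [h]

theorem pv_flatMap_desc (f : String → Int) (u : List String) :
    ∀ n : Nat, ((List.range (n+1)).map (fun k : Nat => ((n : Int) - (k : Int)))).flatMap
        (fun c => u.filter (fun s => f s == c)) = pvBuck f n u := by
  intro n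
  induction n with
  | zero =>
    rw [show List.range (0+1) = [0] from rfl]
    simp only [List.map_cons, List.map_nil, List.flatMap_cons, List.flatMap_nil,
      List.append_nil, pvBuck]
    have h0 : ((0 : Nat) : Int) - ((0 : Nat) : Int) = (0 : Int) := by norm_num
    rw [h0]
  | succ n ih =>
    rw [List.range_succ_eq_map]
    simp only [List.map_cons, List.map_map, List.flatMap_cons]
    have hmap : ((fun k : Nat => (((n+1 : Nat)) : Int) - (k : Int)) ∘ Nat.succ)
        = (fun k : Nat => ((n : Int) - (k : Int))) := by
      funext k
      show (((n+1 : Nat)) : Int) - ((Nat.succ k : Nat) : Int) = (n : Int) - (k : Int)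
      push_cast
      ring
    rw [hmap, ih]
    simp only [pvBuck]
    have hc : (((n+1 : Nat)) : Int) - ((0 : Nat) : Int) = (n : Int) + 1 := by push_cast; ring
    rw [hc]

-- ===== VERDICT (by name: the statement is the Claim_ definition above) =====
theorem Order_List_By_Commas_spec : Claim_equal_Order_List_By_Commas := by
  intro l _ hpre
  unfold Spec_Order_List_By_Commas
  simp only [Order_List_By_Commas_alt]
  have hA : Order_List_By_Commas l
      = PySem.List.sorted (PySem.List.dedup l)
          (fun s => ((PySem.Str.count s "," : Nat) : Int)) true :=
    pv_A_eq _ (fun s => pv_cnt_eq s) l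
  have hune : PySem.List.dedup l ≠ [] := by
    cases l with
    | nil => exact absurd rfl hpre
    | cons a t =>
      have ha : a ∈ PySem.List.dedup (a :: t) := by
        show a ∈ PySem.Set.ofList (a :: t)
        rw [PySem.Set.mem_ofList]
        simp
      exact List.ne_nil_of_mem ha
  have hfold : (PySem.List.dedup l).foldl (fun d item =>
        d.modify ((PySem.Str.count item "," : Nat) : Int) [] (fun b => b ++ [item]))
        PySem.Dict.empty
      = ((PySem.List.dedup l).map (fun s => (((PySem.Str.count s "," : Nat) : Int), s))).foldl
          (fun d p => d.modify p.1 [] (fun b => b ++ [p.2])) PySem.Dict.empty := by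
    rw [List.foldl_map]
  rw [hfold]
  have hgetD : ∀ c : Int,
      (((PySem.List.dedup l).map (fun s => (((PySem.Str.count s "," : Nat) : Int), s))).foldl
          (fun d p => d.modify p.1 [] (fun b => b ++ [p.2])) PySem.Dict.empty).getD c []
        = (PySem.List.dedup l).filter (fun s => ((PySem.Str.count s "," : Nat) : Int) == c) := by
    intro c
    rw [PySem.Dict.getD_foldl_modify_append]
    rw [PySem.Dict.getD_empty]
    rw [List.filter_map]
    rw [List.map_map]
    simp [Function.comp_def]
  have hkeys : (((PySem.List.dedup l).map (fun s => (((PySem.Str.count s "," : Nat) : Int), s))).foldl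
        (fun d p => d.modify p.1 [] (fun b => b ++ [p.2])) PySem.Dict.empty).keys
      = PySem.Set.ofList ((PySem.List.dedup l).map (fun s => ((PySem.Str.count s "," : Nat) : Int))) := by
    rw [PySem.Dict.keys_foldl_modify_key
      ((PySem.List.dedup l).map (fun s => (((PySem.Str.count s "," : Nat) : Int), s)))
      (fun p => p.1) [] (fun _ p => (fun b => b ++ [p.2])) PySem.Dict.empty]
    rw [PySem.Dict.keys_empty, List.map_map]
    simp [PySem.Set.ofList_eq_foldl, PySem.Set.update, Function.comp_def]
  cases hm : PySem.List.max? ((((PySem.List.dedup l).map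
      (fun s => (((PySem.Str.count s "," : Nat) : Int), s))).foldl
      (fun d p => d.modify p.1 [] (fun b => b ++ [p.2])) PySem.Dict.empty).keys)
      (fun c => c) with
  | none =>
    exfalso
    rw [PySem.List.max?_eq_none_iff, hkeys] at hm
    cases hd : PySem.List.dedup l with
    | nil => exact hune hd
    | cons a t =>
      have ha : ((PySem.Str.count a "," : Nat) : Int)
          ∈ PySem.Set.ofList ((PySem.List.dedup l).map (fun s => ((PySem.Str.count s "," : Nat) : Int))) := by
        rw [PySem.Set.mem_ofList]
        rw [hd]
        simp
      rw [hm] at ha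
      simp at ha
  | some mx =>
    dsimp only
    have hmx_mem : mx ∈ (PySem.List.dedup l).map (fun s => ((PySem.Str.count s "," : Nat) : Int)) := by
      have := PySem.List.max?_mem hm
      rw [hkeys, PySem.Set.mem_ofList] at this
      exact this
    have hmx_nonneg : 0 ≤ mx := by
      rcases List.mem_map.mp hmx_mem with ⟨s, -, hs⟩
      rw [← hs]
      exact Int.natCast_nonneg _
    have hbound : ∀ x ∈ PySem.List.dedup l,
        0 ≤ ((PySem.Str.count x "," : Nat) : Int) ∧ ((PySem.Str.count x "," : Nat) : Int) ≤ mx := by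
      intro x hx
      refine ⟨Int.natCast_nonneg _, ?_⟩
      have hmem : ((PySem.Str.count x "," : Nat) : Int)
          ∈ (((PySem.List.dedup l).map (fun s => (((PySem.Str.count s "," : Nat) : Int), s))).foldl
            (fun d p => d.modify p.1 [] (fun b => b ++ [p.2])) PySem.Dict.empty).keys := by
        rw [hkeys, PySem.Set.mem_ofList]
        exact List.mem_map_of_mem hx
      exact PySem.List.max?_isMax hm _ hmem
    rw [PySem.List.foldl_append_eq_flatMap, List.nil_append]
    simp only [hgetD]
    have hmxcast : ((mx.toNat : Nat) : Int) = mx := Int.toNat_of_nonneg hmx_nonneg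
    rw [← hmxcast, pv_range_desc, pv_flatMap_desc]
    rw [hA]
    exact pv_core _ mx.toNat (PySem.List.dedup l)
      (by intro x hx; rw [hmxcast]; exact hbound x hx)
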